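-- pv_equiv track=rewrite | github.com/jagdalepatil2002/travelfrontendd | section_utils.py | paginate_sections
-- ===== SOURCE A (Python) =====
-- from typing import List, Dict
--
-- def paginate_sections(sections: List[Dict[str, str]], max_sections_per_page: int = 3, max_chars_per_page: int = 6000) -> List[List[Dict[str, str]]]:
--     """
--     Groups sections into pages, with up to max_sections_per_page per page.
--     If a page would exceed max_chars_per_page, reduce the number of sections on that page.
--     """
--     pages = []
--     i = 0
--     while i < len(sections):
--         page = []
--         chars = 0
--         for j in range(max_sections_per_page):
--             if i + j >= len(sections):
--                 break
--             section = sections[i + j]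
--             section_len = len(section['title']) + len(section['content'])
--             if chars + section_len > max_chars_per_page and j > 0:
--                 break
--             page.append(section)
--             chars += section_len
--         pages.append(page)
--         i += len(page)
--     return pages
-- ===== SOURCE B (Python) =====
-- def paginate_sections(sections, max_sections_per_page=3, max_chars_per_page=6000):
--     pages = []
--     page = []
--     chars = 0
--     for section in sections:
--         section_len = len(section['title']) + len(section['content'])
--         if page and (len(page) >= max_sections_per_page or chars + section_len > max_chars_per_page):
--             pages.append(page)
--             page = []
--             chars = 0
--         page.append(section)
--         chars += section_len
--     if page:
--         pages.append(page)
--     return pages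
-- ===== Notes on version B (the rewrite author's own statement) =====
-- stated objective: simpler
-- what changed: Replaced the outer-while/inner-for index arithmetic (i, i+j, re-slicing by page length) with a single linear scan carrying the current page and its running character count, flushing the page when it is full or would overflow.
import Mathlib
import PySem

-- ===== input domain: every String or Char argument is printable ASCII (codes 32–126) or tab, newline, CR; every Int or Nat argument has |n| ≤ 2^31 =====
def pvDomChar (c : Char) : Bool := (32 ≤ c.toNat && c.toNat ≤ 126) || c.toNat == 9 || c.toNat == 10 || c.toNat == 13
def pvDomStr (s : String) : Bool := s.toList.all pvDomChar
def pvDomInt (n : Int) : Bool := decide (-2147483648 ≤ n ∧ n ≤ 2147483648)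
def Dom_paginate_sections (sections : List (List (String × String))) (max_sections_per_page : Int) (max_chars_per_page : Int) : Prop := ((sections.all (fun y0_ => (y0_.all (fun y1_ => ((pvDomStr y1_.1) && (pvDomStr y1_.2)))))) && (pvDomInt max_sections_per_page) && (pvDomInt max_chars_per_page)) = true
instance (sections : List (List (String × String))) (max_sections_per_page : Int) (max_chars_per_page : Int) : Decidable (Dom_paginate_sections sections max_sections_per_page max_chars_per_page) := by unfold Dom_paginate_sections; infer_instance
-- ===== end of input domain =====

-- B replaces A's outer-while/inner-for index arithmetic with a single linear scan that
-- carries the current page and its running character count (objective: simpler).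

-- ===== PORT A =====

-- len(section['title']) + len(section['content']); dict lookup = first match in the
-- association list.  Pre_ guarantees both keys are present (Python raises KeyError
-- otherwise), so the `getD ""` default is never used inside Pre_.
def pvSectionLen (sec : List (String × String)) : Int :=
  PySem.Str.len (((sec.find? (fun p => p.1 == "title")).map (·.2)).getD "") +
  PySem.Str.len (((sec.find? (fun p => p.1 == "content")).map (·.2)).getD "")

-- inner `for j in range(max_sections_per_page)` of A: k = iterations left, j = loop index
def pageLoopA (max_chars_per_page : Int) (rem : List (List (String × String))) (k j : Nat)
    (page : List (List (String × String))) (chars : Int) :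
    List (List (String × String)) × Int :=
  match k, rem with
  | 0, _ => (page, chars)
  | _ + 1, [] => (page, chars)              -- "if i + j >= len(sections): break"
  | k' + 1, sec :: rest =>
      let sec_len := pvSectionLen sec
      if chars + sec_len > max_chars_per_page ∧ 0 < j then (page, chars)
      else pageLoopA max_chars_per_page rest k' (j + 1) (page ++ [sec]) (chars + sec_len)

-- outer `while i < len(sections)` of A, on the suffix sections[i:]
def outerA (max_sections_per_page max_chars_per_page : Int) :
    List (List (String × String)) → List (List (List (String × String)))
  | [] => []
  | s :: rest =>
      if h : (pageLoopA max_chars_per_page (s :: rest) max_sections_per_page.toNat 0 [] 0).1.length = 0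
      then [[]]      -- here Python loops forever (max_sections_per_page ≤ 0); outside Pre_
      else (pageLoopA max_chars_per_page (s :: rest) max_sections_per_page.toNat 0 [] 0).1 ::
        outerA max_sections_per_page max_chars_per_page
          ((s :: rest).drop (pageLoopA max_chars_per_page (s :: rest) max_sections_per_page.toNat 0 [] 0).1.length)
termination_by l => l.length
decreasing_by simp only [List.length_drop, List.length_cons]; omega

def paginate_sections (sections : List (List (String × String))) (max_sections_per_page : Int) (max_chars_per_page : Int) : List (List (List (String × String))) :=
  outerA max_sections_per_page max_chars_per_page sections

-- ===== PORT B =====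

-- B's single for-loop over sections, carrying (page, chars, pages)
def altLoop (max_sections_per_page max_chars_per_page : Int) :
    List (List (String × String)) → List (List (String × String)) → Int →
    List (List (List (String × String))) → List (List (List (String × String)))
  | [], page, _, pages => if page = [] then pages else pages ++ [page]
  | sec :: rest, page, chars, pages =>
      let sec_len := pvSectionLen sec
      if page ≠ [] ∧ ((page.length : Int) ≥ max_sections_per_page ∨ chars + sec_len > max_chars_per_page)
      then altLoop max_sections_per_page max_chars_per_page rest [sec] sec_len (pages ++ [page])
      else altLoop max_sections_per_page max_chars_per_page rest (page ++ [sec]) (chars + sec_len) pages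

def paginate_sections_alt (sections : List (List (String × String))) (max_sections_per_page : Int) (max_chars_per_page : Int) : List (List (List (String × String))) :=
  altLoop max_sections_per_page max_chars_per_page sections [] 0 []

-- ===== PRECONDITION & SPEC =====
-- Pre_ excludes (a) nonempty input with max_sections_per_page < 1, where A's while loop never
-- advances i and Python diverges, and (b) sections missing a 'title' or 'content' key, where
-- A raises KeyError.
def Pre_paginate_sections (sections : List (List (String × String))) (max_sections_per_page : Int) (max_chars_per_page : Int) : Prop :=
  (sections ≠ [] → 1 ≤ max_sections_per_page) ∧
  ∀ s ∈ sections, (s.find? (fun p => p.1 == "title")).isSome ∧ (s.find? (fun p => p.1 == "content")).isSome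
instance (sections : List (List (String × String))) (max_sections_per_page : Int) (max_chars_per_page : Int) : Decidable (Pre_paginate_sections sections max_sections_per_page max_chars_per_page) := by unfold Pre_paginate_sections; infer_instance
def pvWitness_paginate_sections : (List (List (String × String))) × Int × Int :=
  ([[("title", "ab"), ("content", "cde")], [("title", "x"), ("content", "y")]], 3, 6000)

def Spec_paginate_sections (sections : List (List (String × String))) (max_sections_per_page : Int) (max_chars_per_page : Int) (out : List (List (List (String × String)))) : Prop := out = paginate_sections_alt sections max_sections_per_page max_chars_per_page
instance (sections : List (List (String × String))) (max_sections_per_page : Int) (max_chars_per_page : Int) (out : List (List (List (String × String)))) : Decidable (Spec_paginate_sections sections max_sections_per_page max_chars_per_page out) := by unfold Spec_paginate_sections; infer_instance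

-- ===== CLAIM (what is proved, stated in full; the proofs are below) =====
def Claim_equal_paginate_sections : Prop := ∀ (sections : List (List (String × String))) (max_sections_per_page : Int) (max_chars_per_page : Int), Dom_paginate_sections sections max_sections_per_page max_chars_per_page → Pre_paginate_sections sections max_sections_per_page max_chars_per_page → Spec_paginate_sections sections max_sections_per_page max_chars_per_page (paginate_sections sections max_sections_per_page max_chars_per_page)

-- ===== LEMMAS AND PROOFS =====

-- pageLoopA only appends to its page accumulator
lemma pageLoopA_len_ge (mc : Int) :
    ∀ (rem : List (List (String × String))) (k j : Nat) page (chars : Int),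
    page.length ≤ (pageLoopA mc rem k j page chars).1.length := by
  intro rem
  induction rem with
  | nil => intro k j page chars; cases k <;> simp [pageLoopA]
  | cons s rest ih =>
      intro k j page chars
      cases k with
      | zero => simp [pageLoopA]
      | succ k' =>
          simp only [pageLoopA]
          split
          · simp
          · exact le_trans (by simp) (ih k' (j + 1) (page ++ [s]) _)

-- "A's continuation from the middle of a page": finish the current page (with j = page.length
-- iterations of the inner loop already done), then continue with fresh pages.
def contA (m mc : Int) (page : List (List (String × String))) (chars : Int) :
    List (List (String × String)) → List (List (List (String × String)))
  | [] => if page = [] then [] else [page]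
  | s :: rest =>
      let full := (pageLoopA mc (s :: rest) (m.toNat - page.length) page.length page chars).1
      full :: outerA m mc ((s :: rest).drop (full.length - page.length))

lemma contA_nil_eq_outerA (m mc : Int) (hm : 0 < m) :
    ∀ suffix, contA m mc [] 0 suffix = outerA m mc suffix := by
  intro suffix
  cases suffix with
  | nil => simp [contA, outerA]
  | cons s rest =>
      have hk : ∃ k', m.toNat = k' + 1 := ⟨m.toNat - 1, by omega⟩
      obtain ⟨k', hk⟩ := hk
      have hlen : 1 ≤ (pageLoopA mc (s :: rest) m.toNat 0 [] 0).1.length := by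
        rw [hk]
        simp only [pageLoopA]
        have := pageLoopA_len_ge mc rest k' 1 [s] (0 + pvSectionLen s)
        simpa using this
      simp only [contA, outerA]
      rw [dif_neg (by omega)]
      simp

-- one non-flushing step of A's continuation absorbs the next section into the current page
lemma contA_step (m mc : Int) (hm : 0 < m) (s : List (String × String))
    (rest : List (List (String × String))) (page : List (List (String × String))) (chars : Int)
    (hlen : page.length < m.toNat)
    (hc : page ≠ [] → ¬ (chars + pvSectionLen s > mc)) :
    contA m mc page chars (s :: rest) = contA m mc (page ++ [s]) (chars + pvSectionLen s) rest := by
  have hk : m.toNat - page.length = (m.toNat - (page.length + 1)) + 1 := by omega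
  have hcond : ¬ (chars + pvSectionLen s > mc ∧ 0 < page.length) := by
    rcases Classical.em (page = []) with h | h
    · simp [h]
    · have := hc h
      intro ⟨h1, _⟩; exact this h1
  simp only [contA]
  rw [hk]
  simp only [pageLoopA, if_neg hcond]
  set full := (pageLoopA mc rest (m.toNat - (page.length + 1)) (page.length + 1) (page ++ [s]) (chars + pvSectionLen s)).1 with hfull
  have hge : page.length + 1 ≤ full.length := by
    have := pageLoopA_len_ge mc rest (m.toNat - (page.length + 1)) (page.length + 1) (page ++ [s]) (chars + pvSectionLen s)
    simpa using this
  cases rest with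
  | nil =>
      have : full = page ++ [s] := by
        rw [hfull]; cases (m.toNat - (page.length + 1)) <;> simp [pageLoopA]
      simp [contA, this, outerA]
  | cons t ts =>
      simp only [contA]
      have harith : full.length - page.length = (full.length - (page.length + 1)) + 1 := by omega
      rw [harith]
      simp only [List.drop_succ_cons, List.length_append, List.length_cons, List.length_nil]
      rw [← hfull]

-- main invariant: B's scan state (page, chars, pages) tracks A mid-page
lemma altLoop_eq_contA (m mc : Int) (hm : 0 < m) :
    ∀ (suffix : List (List (String × String))) (page : List (List (String × String)))
      (chars : Int) (pages : List (List (List (String × String)))),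
      (page.length : Int) ≤ m → (page = [] → chars = 0) →
      altLoop m mc suffix page chars pages = pages ++ contA m mc page chars suffix := by
  intro suffix
  induction suffix with
  | nil =>
      intro page chars pages _ _
      simp only [altLoop, contA]
      split <;> simp
  | cons s rest ih =>
      intro page chars pages hle h0
      simp only [altLoop]
      by_cases hfl : page ≠ [] ∧ ((page.length : Int) ≥ m ∨ chars + pvSectionLen s > mc)
      · rw [if_pos hfl]
        obtain ⟨hne, hor⟩ := hfl
        rw [ih [s] (pvSectionLen s) (pages ++ [page]) (by simp only [List.length_cons, List.length_nil]; omega) (by simp)]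
        -- A side: the current page closes here
        have hclose : contA m mc page chars (s :: rest) = page :: outerA m mc (s :: rest) := by
          rcases Classical.em ((page.length : Int) = m) with hfullp | hfullp
          · have hk0 : m.toNat - page.length = 0 := by omega
            simp [contA, hk0, pageLoopA]
          · have hlt : page.length < m.toNat := by omega
            have hk : m.toNat - page.length = (m.toNat - (page.length + 1)) + 1 := by omega
            have hcgt : chars + pvSectionLen s > mc := by
              rcases hor with h | h
              · exact absurd (le_antisymm hle h) hfullp
              · exact h
            have hj : 0 < page.length := List.length_pos_of_ne_nil hne
            simp only [contA]
            rw [hk]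
            simp only [pageLoopA]
            rw [if_pos (show mc < chars + pvSectionLen s ∧ 0 < page.length from ⟨hcgt, hj⟩)]
            simp
        rw [hclose]
        have hnext : outerA m mc (s :: rest) = contA m mc [s] (pvSectionLen s) rest := by
          rw [← contA_nil_eq_outerA m mc hm]
          rw [contA_step m mc hm s rest [] 0 (by simp only [List.length_nil]; omega) (by simp)]
          simp
        rw [hnext]
        simp
      · rw [if_neg hfl]
        push_neg at hfl
        have hlt2 : page.length < m.toNat := by
          rcases Classical.em (page = []) with h | h
          · subst h; simp only [List.length_nil]; omega
          · have := (hfl h).1; omega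
        have hcok : page ≠ [] → ¬ (chars + pvSectionLen s > mc) := fun h => by
          have := (hfl h).2; omega
        rw [ih (page ++ [s]) (chars + pvSectionLen s) pages
              (by simp only [List.length_append, List.length_cons, List.length_nil]; omega) (by simp)]
        rw [contA_step m mc hm s rest page chars hlt2 hcok]

-- ===== VERDICT (by name: the statement is the Claim_ definition above) =====
theorem paginate_sections_spec : Claim_equal_paginate_sections := by
  intro sections m mc _ hpre
  unfold Spec_paginate_sections
  cases sections with
  | nil => simp [paginate_sections, paginate_sections_alt, outerA, altLoop]
  | cons s rest =>
      have hm : 0 < m := by have := hpre.1 (by simp); omega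
      unfold paginate_sections paginate_sections_alt
      rw [altLoop_eq_contA m mc hm (s :: rest) [] 0 [] (by simp; omega) (fun _ => rfl)]
      rw [contA_nil_eq_outerA m mc hm]
      simp
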